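-- pv_equiv track=rewrite | github.com/isa43461/ADA | hw03/scarecrow.py | solve
-- ===== SOURCE A (Python) =====
-- def solve(A):
-- 	cont = 0 ; i = 0 ; n = len(A)
-- 	while(i < n):
-- 		if(A[i] == '.'):
-- 			cont += 1
-- 			i+=3
-- 		else:
-- 			i+=1
-- 	return cont
-- ===== SOURCE B (Python) =====
-- def solve(A):
--     positions = [i for i, c in enumerate(A) if c == '.']
--     cont = 0
--     next_allowed = 0
--     for p in positions:
--         if p >= next_allowed:
--             cont += 1
--             next_allowed = p + 3
--     return cont
-- ===== Notes on version B (the rewrite author's own statement) =====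
-- stated objective: alternative
-- what changed: A's single index-jumping while loop (i += 3 after a dot, i += 1 otherwise) is replaced by first extracting the list of dot positions with enumerate and then a greedy scan over that list maintaining a next_allowed threshold.
import Mathlib
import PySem

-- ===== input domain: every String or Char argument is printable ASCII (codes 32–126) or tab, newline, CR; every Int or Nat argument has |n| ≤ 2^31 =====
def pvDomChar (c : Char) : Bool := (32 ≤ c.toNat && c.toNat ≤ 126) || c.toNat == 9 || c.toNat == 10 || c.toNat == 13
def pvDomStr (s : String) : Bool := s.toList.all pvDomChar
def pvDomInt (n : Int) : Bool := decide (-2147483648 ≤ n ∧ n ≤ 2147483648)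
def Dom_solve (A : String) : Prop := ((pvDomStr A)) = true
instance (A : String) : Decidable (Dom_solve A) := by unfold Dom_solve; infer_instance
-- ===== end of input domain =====

-- B is an alternative decomposition of the same O(n) greedy: extract dot positions first, then scan
-- them with a next_allowed threshold, instead of A's index-jumping while loop.

-- ===== PORT A =====
-- A's while loop: i jumps by 3 after a dot, by 1 otherwise; decreasing measure n - i.
def solveLoop (cs : List Char) (cont : Int) (i : Nat) : Int :=
  if h : i < cs.length then
    if cs[i] = '.' then solveLoop cs (cont + 1) (i + 3)
    else solveLoop cs cont (i + 1)
  else cont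
termination_by cs.length - i

def solve (A : String) : Int := solveLoop A.toList 0 0

-- ===== PORT B =====
-- positions = [i for i, c in enumerate(A) if c == '.']
def dotPos (cs : List Char) : List Nat :=
  ((cs.zipIdx).filter (fun pc => pc.1 = '.')).map Prod.snd

-- the for-loop over positions with state (next_allowed, cont)
def greedyB (ps : List Nat) (next_allowed : Nat) (cont : Int) : Int :=
  match ps with
  | [] => cont
  | p :: rest => if p ≥ next_allowed then greedyB rest (p + 3) (cont + 1)
                 else greedyB rest next_allowed cont

def solve_alt (A : String) : Int := greedyB (dotPos A.toList) 0 0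

-- ===== PRECONDITION & SPEC =====
def Spec_solve (A : String) (out : Int) : Prop := out = solve_alt A
instance (A : String) (out : Int) : Decidable (Spec_solve A out) := by unfold Spec_solve; infer_instance

-- ===== CLAIM (what is proved, stated in full; the proofs are below) =====
def Claim_equal_solve : Prop := ∀ (A : String), Dom_solve A → Spec_solve A (solve A)

-- ===== LEMMAS AND PROOFS =====

-- reference function: pure greedy over the character list
def dotCount (cs : List Char) : Int :=
  match cs with
  | [] => 0
  | c :: rest => if c = '.' then 1 + dotCount (rest.drop 2) else dotCount rest
termination_by cs.length
decreasing_by all_goals simp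

theorem solveLoop_eq (cs : List Char) (cont : Int) (i : Nat) :
    solveLoop cs cont i = cont + dotCount (cs.drop i) := by
  by_cases h : i < cs.length
  · have hd : cs.drop i = cs[i] :: cs.drop (i + 1) := List.drop_eq_getElem_cons h
    rw [solveLoop]
    simp only [h, dif_pos]
    by_cases hc : cs[i] = '.'
    · rw [if_pos hc, solveLoop_eq cs (cont + 1) (i + 3), hd, dotCount, if_pos hc]
      have : (cs.drop (i + 1)).drop 2 = cs.drop (i + 3) := by
        rw [List.drop_drop]
      rw [this]; ring
    · rw [if_neg hc, solveLoop_eq cs cont (i + 1), hd, dotCount, if_neg hc]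
  · rw [solveLoop]
    simp only [h, dif_neg, not_false_iff]
    rw [List.drop_eq_nil_of_le (by omega), dotCount]
    ring
termination_by cs.length - i
decreasing_by all_goals omega

theorem dotPos_cons (c : Char) (cs : List Char) :
    dotPos (c :: cs) = (if c = '.' then [0] else []) ++ (dotPos cs).map (· + 1) := by
  unfold dotPos
  rw [List.zipIdx_cons, List.zipIdx_succ]
  by_cases hc : c = '.' <;>
    simp [hc, List.filter_map, List.map_map, Function.comp_def]

theorem greedyB_shift (ps : List Nat) (na : Nat) (cont : Int) :
    greedyB (ps.map (· + 1)) na cont = greedyB ps (na - 1) cont := by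
  induction ps generalizing na cont with
  | nil => rfl
  | cons p rest ih =>
    simp only [List.map_cons, greedyB]
    have hiff : (p + 1 ≥ na) ↔ (p ≥ na - 1) := by omega
    by_cases h : p + 1 ≥ na
    · rw [if_pos h, if_pos (hiff.mp h), ih]
      congr 1
    · rw [if_neg h, if_neg (fun h' => h (hiff.mpr h')), ih]

theorem greedyB_dotPos (cs : List Char) (na : Nat) (cont : Int) :
    greedyB (dotPos cs) na cont = cont + dotCount (cs.drop na) := by
  induction cs generalizing na cont with
  | nil => simp [dotPos, greedyB, dotCount]
  | cons c rest ih =>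
    rw [dotPos_cons]
    by_cases hc : c = '.'
    · rw [if_pos hc]
      by_cases hna : na = 0
      · subst hna
        subst hc
        rw [List.singleton_append, greedyB, if_pos (Nat.zero_le 0)]
        rw [greedyB_shift, ih]
        rw [show (0 + 3 - 1 : Nat) = 2 from rfl, List.drop_zero]
        simp only [dotCount, if_true]
        ring
      · have h0 : ¬ ((0 : Nat) ≥ na) := by omega
        simp only [List.singleton_append, greedyB, if_neg h0]
        rw [greedyB_shift, ih]
        obtain ⟨m, rfl⟩ : ∃ m, na = m + 1 := ⟨na - 1, by omega⟩
        simp [List.drop_succ_cons]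
    · rw [if_neg hc, List.nil_append, greedyB_shift, ih]
      by_cases hna : na = 0
      · subst hna
        simp only [Nat.zero_sub, List.drop_zero, dotCount, if_neg hc]
      · obtain ⟨m, rfl⟩ : ∃ m, na = m + 1 := ⟨na - 1, by omega⟩
        simp [List.drop_succ_cons]

-- ===== VERDICT (by name: the statement is the Claim_ definition above) =====
theorem solve_spec : Claim_equal_solve := by
  intro A _
  unfold Spec_solve solve solve_alt
  rw [solveLoop_eq, greedyB_dotPos]
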